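-- pv_equiv track=rewrite | github.com/tidewise/buildbot-ci | master/dashboard.py | compute_toplevel_builds
-- ===== SOURCE A (Python) =====
-- def compute_toplevel_builds(build_info):
--     info = {}
--     for build in build_info:
--         builder_name = build['builder_name']
--         if builder_name in info:
--             info[builder_name].append(build)
--         else:
--             info[builder_name] = [build]
--
--     return info
-- ===== SOURCE B (Python) =====
-- def compute_toplevel_builds(build_info):
--     names = dict.fromkeys(b['builder_name'] for b in build_info)
--     return {n: [b for b in build_info if b['builder_name'] == n] for n in names}
-- ===== Notes on version B (the rewrite author's own statement) =====
-- stated objective: idiomatic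
-- what changed: Replaces the single-pass dict accumulation (check membership, append or create) with a two-phase comprehension style: collect the distinct builder names in first-occurrence order via dict.fromkeys, then build the result with one dict comprehension that filters the builds for each name.
import Mathlib
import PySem

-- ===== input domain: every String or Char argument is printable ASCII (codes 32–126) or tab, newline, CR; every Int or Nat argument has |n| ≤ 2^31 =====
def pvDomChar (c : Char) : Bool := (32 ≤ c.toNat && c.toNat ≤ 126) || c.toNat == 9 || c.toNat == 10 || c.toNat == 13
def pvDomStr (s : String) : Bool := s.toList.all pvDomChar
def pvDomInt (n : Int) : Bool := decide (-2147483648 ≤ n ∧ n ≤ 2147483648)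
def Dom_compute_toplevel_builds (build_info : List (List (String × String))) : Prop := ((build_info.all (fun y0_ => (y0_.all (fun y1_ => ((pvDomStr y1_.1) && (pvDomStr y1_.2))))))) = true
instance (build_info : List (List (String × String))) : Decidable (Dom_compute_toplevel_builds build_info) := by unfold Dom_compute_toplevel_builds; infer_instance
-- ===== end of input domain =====

-- B replaces A's single-pass dict accumulation by an ordered dedup of the builder names followed
-- by a per-name filter comprehension (objective: idiomatic; not faster). Return values only; no mutation.
-- ===== PORT A =====
-- build['builder_name'] (first-match lookup); total via default "" — inputs where the key is
-- missing (Python KeyError) are excluded by Pre_ below.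
def pvKey (b : List (String × String)) : String :=
  (PySem.Dict.mk b).getD "builder_name" ""

def compute_toplevel_builds (build_info : List (List (String × String))) : List (String × List (List (String × String))) :=
  (build_info.foldl (fun info build =>
     let n := pvKey build
     if info.contains n then info.modify n [] (· ++ [build])
     else info.insert n [build]) PySem.Dict.empty).items

-- ===== PORT B =====
-- names = dict.fromkeys(b['builder_name'] for b in build_info)  → PySem.List.dedup of the mapped keys;
-- then {n: [b for b in build_info if b['builder_name'] == n] for n in names}.
def compute_toplevel_builds_alt (build_info : List (List (String × String))) : List (String × List (List (String × String))) :=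
  (PySem.List.dedup (build_info.map pvKey)).map (fun n => (n, build_info.filter (fun b => pvKey b == n)))

-- ===== PRECONDITION & SPEC =====
-- Pre_ excludes exactly the inputs where some build lacks the 'builder_name' key, on which the Python A raises KeyError.
def Pre_compute_toplevel_builds (build_info : List (List (String × String))) : Prop :=
  ∀ b ∈ build_info, "builder_name" ∈ b.map Prod.fst
instance (build_info : List (List (String × String))) : Decidable (Pre_compute_toplevel_builds build_info) := by unfold Pre_compute_toplevel_builds; infer_instance
def pvWitness_compute_toplevel_builds : (List (List (String × String))) :=
  [[("builder_name", "a"), ("x", "1")], [("builder_name", "b")], [("builder_name", "a")]]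
def Spec_compute_toplevel_builds (build_info : List (List (String × String))) (out : List (String × List (List (String × String)))) : Prop := out = compute_toplevel_builds_alt build_info
instance (build_info : List (List (String × String))) (out : List (String × List (List (String × String)))) : Decidable (Spec_compute_toplevel_builds build_info out) := by unfold Spec_compute_toplevel_builds; infer_instance

-- ===== CLAIM (what is proved, stated in full; the proofs are below) =====
def Claim_equal_compute_toplevel_builds : Prop := ∀ (build_info : List (List (String × String))), Dom_compute_toplevel_builds build_info → Pre_compute_toplevel_builds build_info → Spec_compute_toplevel_builds build_info (compute_toplevel_builds build_info)

-- ===== LEMMAS AND PROOFS =====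
-- A's loop body is exactly Dict.modify: the 'in info' branch is modify by definition, and on a
-- missing key modify inserts f [] = [build] at the end, which is A's else-branch insert.
theorem pv_step_eq (d : PySem.Dict String (List (List (String × String)))) (b : List (String × String)) :
    (if d.contains (pvKey b) = true then d.modify (pvKey b) [] (fun x => x ++ [b]) else d.insert (pvKey b) [b])
    = d.modify (pvKey b) [] (fun x => x ++ [b]) := by
  split
  · rfl
  · rename_i h
    simp only [PySem.Dict.modify]
    rw [PySem.Dict.getD_of_not_contains d [] (by simpa using h)]; rfl

theorem pv_foldl_is_modify (bi : List (List (String × String))) :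
    bi.foldl (fun info build =>
      let n := pvKey build
      if info.contains n then info.modify n [] (· ++ [build])
      else info.insert n [build]) PySem.Dict.empty
    = bi.foldl (fun d b => d.modify (pvKey b) [] (fun x => x ++ [b])) PySem.Dict.empty := by
  congr 1
  funext d b
  exact pv_step_eq d b

theorem pv_main (bi : List (List (String × String))) : compute_toplevel_builds bi = compute_toplevel_builds_alt bi := by
  unfold compute_toplevel_builds compute_toplevel_builds_alt
  rw [pv_foldl_is_modify]
  have hnd : (bi.foldl (fun d b => d.modify (pvKey b) [] (fun x => x ++ [b])) PySem.Dict.empty).keys.Nodup :=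
    PySem.Dict.nodup_keys_foldl_modify_key bi pvKey [] (fun _ b v => v ++ [b]) PySem.Dict.empty (by simp)
  rw [PySem.Dict.items_eq_map_keys _ hnd []]
  rw [PySem.Dict.keys_foldl_modify_key bi pvKey [] (fun _ b v => v ++ [b]) PySem.Dict.empty]
  rw [show (PySem.Dict.empty : PySem.Dict String (List (List (String × String)))).keys = [] from rfl]
  rw [PySem.Set.update_nil_left, PySem.List.dedup_eq_ofList]
  apply List.map_congr_left
  intro k _
  have hget : (bi.foldl (fun d b => d.modify (pvKey b) [] (fun x => x ++ [b])) PySem.Dict.empty).getD k []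
      = bi.filter (fun b => pvKey b == k) := by
    rw [← List.foldl_map (f := fun b => (pvKey b, b))
        (g := fun (d : PySem.Dict String (List (List (String × String)))) p => d.modify p.1 [] (fun x => x ++ [p.2]))]
    rw [PySem.Dict.getD_foldl_modify_append]
    simp [List.filter_map, Function.comp_def, List.map_map]
  rw [hget]

-- ===== VERDICT (by name: the statement is the Claim_ definition above) =====
theorem compute_toplevel_builds_spec : Claim_equal_compute_toplevel_builds := by
  intro bi _ _
  unfold Spec_compute_toplevel_builds
  exact pv_main bi
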